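-- pv_equiv track=rewrite | github.com/dstumPY/thinkpython | 12_tuples.py | is_meta_pair
-- ===== SOURCE A (Python) =====
-- from typing import Dict, List
--
-- def get_permutations(str_len: int):
--     ls = [(i, j) for i in range(str_len) for j in range(str_len) if i < j]
--     return ls
--
-- def switch_by_perm(str1: str, perm: List[int]) -> List[str]:
--     init_ls = list(str1)
--     tmp_var = init_ls[perm[0]]
--     init_ls[perm[0]] = init_ls[perm[1]]
--     init_ls[perm[1]] = tmp_var
--     return init_ls
--
-- def is_meta_pair(str1: str, str2: str):
--     tmp_len = len(str1)
--     assert tmp_len == len(str2), "Not same length"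
--     permutation_ls = get_permutations(tmp_len)
--     for perm in permutation_ls:
--         test_str1 = switch_by_perm(str1, perm)
--         test_str2 = list(str2)
--         if test_str1 == test_str2:
--             return True
--         else:
--             continue
--     return False
-- ===== SOURCE B (Python) =====
-- def is_meta_pair(str1: str, str2: str):
--     # One pass: collect the differing positions; a single swap works iff there are
--     # exactly two mismatches that cross-match, or none and str1 has a duplicate char.
--     assert len(str1) == len(str2), "Not same length"
--     diffs = [k for k in range(len(str1)) if str1[k] != str2[k]]
--     if not diffs:
--         return len(set(str1)) < len(str1)
--     if len(diffs) == 2: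
--         i, j = diffs
--         return str1[i] == str2[j] and str1[j] == str2[i]
--     return False
-- ===== Notes on version B (the rewrite author's own statement) =====
-- stated objective: faster
-- what changed: A tries every index pair i<j and compares a full swapped copy of str1 against str2; B makes one pass collecting the differing positions and decides: no differences -> str1 has a duplicate character, exactly two differences -> they cross-match, otherwise False.
import Mathlib
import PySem

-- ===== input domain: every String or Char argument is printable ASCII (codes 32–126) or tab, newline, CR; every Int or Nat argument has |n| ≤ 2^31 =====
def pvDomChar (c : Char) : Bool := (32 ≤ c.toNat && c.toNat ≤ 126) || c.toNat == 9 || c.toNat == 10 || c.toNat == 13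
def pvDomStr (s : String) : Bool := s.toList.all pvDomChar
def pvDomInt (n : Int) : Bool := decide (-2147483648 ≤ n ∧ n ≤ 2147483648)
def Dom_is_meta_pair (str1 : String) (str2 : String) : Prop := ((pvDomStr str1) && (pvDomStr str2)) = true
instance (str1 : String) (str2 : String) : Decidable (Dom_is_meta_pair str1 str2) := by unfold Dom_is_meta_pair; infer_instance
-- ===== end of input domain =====

-- B replaces A's scan over all index pairs (each building and comparing a full swapped copy)
-- by a single pass over the differing positions; objective: faster (O(n^3) -> O(n)).

-- ===== PORT A =====
-- get_permutations: [(i, j) for i in range(n) for j in range(n) if i < j]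
def pvPerms (n : Nat) : List (Nat × Nat) :=
  (List.range n).flatMap (fun i => ((List.range n).filter (fun j => i < j)).map (fun j => (i, j)))

-- switch_by_perm: copy the list, swap entries perm[0] and perm[1] via a temp variable
-- (indices are always in range when called from is_meta_pair, so getD's default is never read)
def pvSwitch (l : List Char) (i j : Nat) : List Char :=
  (l.set i (l.getD j ' ')).set j (l.getD i ' ')

-- the for-loop of is_meta_pair: first matching permutation returns True, else False
def pvLoopA (l1 l2 : List Char) : List (Nat × Nat) → Bool
  | [] => false
  | (i, j) :: ps => if pvSwitch l1 i j = l2 then true else pvLoopA l1 l2 ps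

def is_meta_pair (str1 : String) (str2 : String) : Bool :=
  let l1 := str1.toList
  let l2 := str2.toList
  pvLoopA l1 l2 (pvPerms l1.length)

-- ===== PORT B =====
-- diffs = [k for k in range(len(str1)) if str1[k] != str2[k]]
def pvDiffs (l1 l2 : List Char) : List Nat :=
  (List.range l1.length).filter (fun k => l1.getD k ' ' ≠ l2.getD k ' ')

def is_meta_pair_alt (str1 : String) (str2 : String) : Bool :=
  let l1 := str1.toList
  let l2 := str2.toList
  -- assert len(str1) == len(str2): B raises on unequal lengths, which Pre_ excludes;
  -- false is an arbitrary total-function value there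
  if l1.length ≠ l2.length then false
  else
    match pvDiffs l1 l2 with
    | [] => decide ((PySem.Set.ofList l1).length < l1.length)   -- len(set(str1)) < len(str1)
    | [i, j] => (l1.getD i ' ' == l2.getD j ' ') && (l1.getD j ' ' == l2.getD i ' ')
    | _ => false

-- ===== PRECONDITION & SPEC =====
-- A and B raise AssertionError when the lengths differ; Pre_ admits exactly the inputs A returns on.
def Pre_is_meta_pair (str1 : String) (str2 : String) : Prop :=
  str1.toList.length = str2.toList.length
instance (str1 : String) (str2 : String) : Decidable (Pre_is_meta_pair str1 str2) := by
  unfold Pre_is_meta_pair; infer_instance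

def pvWitness_is_meta_pair : String × String := ("abc", "bac")

def Spec_is_meta_pair (str1 : String) (str2 : String) (out : Bool) : Prop := out = is_meta_pair_alt str1 str2
instance (str1 : String) (str2 : String) (out : Bool) : Decidable (Spec_is_meta_pair str1 str2 out) := by unfold Spec_is_meta_pair; infer_instance

-- ===== CLAIM (what is proved, stated in full; the proofs are below) =====
def Claim_equal_is_meta_pair : Prop := ∀ (str1 : String) (str2 : String), Dom_is_meta_pair str1 str2 → Pre_is_meta_pair str1 str2 → Spec_is_meta_pair str1 str2 (is_meta_pair str1 str2)

-- ===== LEMMAS AND PROOFS =====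

theorem pvLoopA_eq_any (l1 l2 : List Char) (ps : List (Nat × Nat)) :
    pvLoopA l1 l2 ps = ps.any (fun p => pvSwitch l1 p.1 p.2 == l2) := by
  induction ps with
  | nil => rfl
  | cons p ps ih =>
    obtain ⟨i, j⟩ := p
    simp only [pvLoopA, ih, List.any_cons]
    split_ifs with h <;> simp [h]

theorem mem_pvPerms (n i j : Nat) : (i, j) ∈ pvPerms n ↔ i < j ∧ j < n := by
  simp [pvPerms, List.mem_flatMap, List.mem_filter, List.mem_range]
  omega

theorem A_true_iff (l1 l2 : List Char) :
    pvLoopA l1 l2 (pvPerms l1.length) = true ↔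
      ∃ i j, i < j ∧ j < l1.length ∧ pvSwitch l1 i j = l2 := by
  rw [pvLoopA_eq_any, List.any_eq_true]
  constructor
  · rintro ⟨⟨i, j⟩, hmem, hp⟩
    rw [mem_pvPerms] at hmem
    exact ⟨i, j, hmem.1, hmem.2, by simpa using hp⟩
  · rintro ⟨i, j, hij, hj, hsw⟩
    exact ⟨(i, j), (mem_pvPerms _ _ _).2 ⟨hij, hj⟩, by simpa using hsw⟩

theorem pvSwitch_getD (l : List Char) (i j k : Nat) (hi : i < l.length) (hj : j < l.length)
    (hk : k < l.length) :
    (pvSwitch l i j).getD k ' ' =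
      if k = j then l.getD i ' ' else if k = i then l.getD j ' ' else l.getD k ' ' := by
  have h1 : k < ((l.set i (l.getD j ' ')).set j (l.getD i ' ')).length := by
    simpa using hk
  rw [pvSwitch, List.getD_eq_getElem _ _ h1]
  simp only [List.getElem_set]
  split_ifs with h2 h3 h4 h5 h6 <;>
    first
      | omega
      | (rw [List.getD_eq_getElem] <;> omega)
      | simp_all

theorem length_pvSwitch (l : List Char) (i j : Nat) : (pvSwitch l i j).length = l.length := by
  simp [pvSwitch]

theorem ext_getD (l1 l2 : List Char) (h : l1.length = l2.length)
    (hk : ∀ k, k < l1.length → l1.getD k ' ' = l2.getD k ' ') : l1 = l2 := by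
  apply List.ext_getElem h
  intro k hk1 hk2
  have := hk k hk1
  rwa [List.getD_eq_getElem _ _ hk1, List.getD_eq_getElem _ _ hk2] at this

theorem mem_pvDiffs (l1 l2 : List Char) (k : Nat) :
    k ∈ pvDiffs l1 l2 ↔ k < l1.length ∧ l1.getD k ' ' ≠ l2.getD k ' ' := by
  simp [pvDiffs, List.mem_filter, List.mem_range]

theorem pairwise_pvDiffs (l1 l2 : List Char) : (pvDiffs l1 l2).Pairwise (· < ·) :=
  List.Pairwise.filter _ List.pairwise_lt_range

-- a swap touches only its two indices
theorem diff_sub_switch (l1 l2 : List Char) (a b : Nat) (ha : a < l1.length) (hb : b < l1.length)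
    (hsw : pvSwitch l1 a b = l2) :
    ∀ k, k ∈ pvDiffs l1 l2 → k = a ∨ k = b := by
  intro k hk
  rw [mem_pvDiffs] at hk
  by_contra hcon
  push Not at hcon
  apply hk.2
  rw [← hsw, pvSwitch_getD l1 a b k ha hb hk.1, if_neg hcon.2, if_neg hcon.1]

theorem switch_self (l : List Char) (a b : Nat) (ha : a < l.length) (hb : b < l.length)
    (heq : l.getD a ' ' = l.getD b ' ') : pvSwitch l a b = l := by
  apply ext_getD _ _ (length_pvSwitch l a b)
  intro k hk
  rw [length_pvSwitch] at hk
  rw [pvSwitch_getD l a b k ha hb hk]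
  split_ifs with h1 h2 <;> simp_all

-- a swap that realizes a pair with a mismatch cannot swap two equal characters
theorem switch_chars_ne (l1 l2 : List Char) (a b : Nat)
    (ha : a < l1.length) (hb : b < l1.length) (hsw : pvSwitch l1 a b = l2)
    (k : Nat) (hk : k ∈ pvDiffs l1 l2) : l1.getD a ' ' ≠ l1.getD b ' ' := by
  intro he
  rw [switch_self l1 a b ha hb he] at hsw
  rw [mem_pvDiffs, hsw] at hk
  exact hk.2 rfl

-- both swapped positions are mismatches when their chars differ
theorem switch_mismatch (l1 l2 : List Char) (a b : Nat) (hab : a ≠ b)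
    (ha : a < l1.length) (hb : b < l1.length) (hsw : pvSwitch l1 a b = l2)
    (hne : l1.getD a ' ' ≠ l1.getD b ' ') :
    a ∈ pvDiffs l1 l2 ∧ b ∈ pvDiffs l1 l2 := by
  constructor
  · rw [mem_pvDiffs]
    refine ⟨ha, ?_⟩
    rw [← hsw, pvSwitch_getD l1 a b a ha hb ha, if_neg hab, if_pos rfl]
    exact hne
  · rw [mem_pvDiffs]
    refine ⟨hb, ?_⟩
    rw [← hsw, pvSwitch_getD l1 a b b ha hb hb, if_pos rfl]
    exact fun hx => hne hx.symm

theorem nodup_iff_no_pair (l : List Char) :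
    l.Nodup ↔ ∀ i j, i < j → j < l.length → l.getD i ' ' ≠ l.getD j ' ' := by
  rw [List.Nodup, List.pairwise_iff_getElem]
  constructor
  · intro h i j hij hj
    have hi : i < l.length := lt_trans hij hj
    rw [List.getD_eq_getElem _ _ hi, List.getD_eq_getElem _ _ hj]
    exact h i j hi hj hij
  · intro h i j hi hj hij
    have := h i j hij hj
    rwa [List.getD_eq_getElem _ _ hi, List.getD_eq_getElem _ _ hj] at this

theorem set_len_lt_iff (l : List Char) : (PySem.Set.ofList l).length < l.length ↔ ¬ l.Nodup := by
  constructor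
  · intro h hnd
    rw [PySem.Set.ofList_eq_self_of_nodup l hnd] at h
    exact lt_irrefl _ h
  · intro hnd
    rcases lt_or_eq_of_le (PySem.Set.length_ofList_le l) with h | h
    · exact h
    · exfalso
      apply hnd
      have hcard : l.toFinset = (PySem.Set.ofList l).toFinset := by
        ext x; simp [List.mem_toFinset, PySem.Set.mem_ofList]
      have hc2 : l.toFinset.card = (PySem.Set.ofList l).toFinset.card := by rw [hcard]
      have h2 : (PySem.Set.ofList l).toFinset.card = (PySem.Set.ofList l).length :=
        List.toFinset_card_of_nodup (PySem.Set.nodup_ofList l)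
      have hct := List.card_toFinset l
      have h3 : l.dedup.length = l.length := by omega
      have h4 := List.Sublist.eq_of_length (List.dedup_sublist l) h3
      rw [← h4]
      exact List.nodup_dedup l

theorem B_true_iff (l1 l2 : List Char) (h : l1.length = l2.length) :
    (match pvDiffs l1 l2 with
     | [] => decide ((PySem.Set.ofList l1).length < l1.length)
     | [i, j] => (l1.getD i ' ' == l2.getD j ' ') && (l1.getD j ' ' == l2.getD i ' ')
     | _ => false) = true ↔
      ∃ i j, i < j ∧ j < l1.length ∧ pvSwitch l1 i j = l2 := by
  rcases hDs : pvDiffs l1 l2 with _ | ⟨i, _ | ⟨j, _ | ⟨r, rs⟩⟩⟩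
  -- case []: l1 = l2, answer = "has duplicate"
  · have hall : ∀ k, k < l1.length → l1.getD k ' ' = l2.getD k ' ' := by
      intro k hk
      by_contra hne
      have : k ∈ pvDiffs l1 l2 := (mem_pvDiffs _ _ _).2 ⟨hk, hne⟩
      rw [hDs] at this
      exact absurd this (List.not_mem_nil)
    have heq : l1 = l2 := ext_getD _ _ h hall
    subst heq
    simp only [decide_eq_true_eq, set_len_lt_iff, nodup_iff_no_pair]
    push Not
    constructor
    · rintro ⟨i, j, hij, hj, he⟩
      exact ⟨i, j, hij, hj, switch_self _ _ _ (lt_trans hij hj) hj he⟩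
    · rintro ⟨i, j, hij, hj, hsw⟩
      refine ⟨i, j, hij, hj, ?_⟩
      have hgd := congrArg (fun l => l.getD j ' ') hsw
      simp only at hgd
      rw [pvSwitch_getD l1 i j j (lt_trans hij hj) hj hj, if_pos rfl] at hgd
      exact hgd
  -- case [i]: a single mismatch cannot be realized by a swap
  · simp only [Bool.false_eq_true, false_iff]
    rintro ⟨a, b, hab, hb, hsw⟩
    have ha : a < l1.length := lt_trans hab hb
    have hi : i ∈ pvDiffs l1 l2 := by rw [hDs]; exact List.mem_singleton_self i
    have hne := switch_chars_ne l1 l2 a b ha hb hsw i hi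
    obtain ⟨hma, hmb⟩ := switch_mismatch l1 l2 a b (Nat.ne_of_lt hab) ha hb hsw hne
    rw [hDs, List.mem_singleton] at hma hmb
    omega
  -- case [i, j]: exactly the cross-match condition
  · have pw := pairwise_pvDiffs l1 l2
    rw [hDs] at pw
    have hij : i < j := by
      rw [List.pairwise_cons] at pw
      exact pw.1 j (by simp)
    have hi : i ∈ pvDiffs l1 l2 := by rw [hDs]; simp
    have hj : j ∈ pvDiffs l1 l2 := by rw [hDs]; simp
    have hi' := (mem_pvDiffs _ _ _).1 hi
    have hj' := (mem_pvDiffs _ _ _).1 hj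
    simp only [Bool.and_eq_true, beq_iff_eq]
    constructor
    · rintro ⟨h1, h2⟩
      refine ⟨i, j, hij, hj'.1, ?_⟩
      apply ext_getD _ _ (by rw [length_pvSwitch]; exact h)
      intro k hk
      rw [length_pvSwitch] at hk
      rw [pvSwitch_getD l1 i j k hi'.1 hj'.1 hk]
      split_ifs with e1 e2
      · subst e1; exact h1
      · subst e2; exact h2
      · by_contra hne
        have : k ∈ pvDiffs l1 l2 := (mem_pvDiffs _ _ _).2 ⟨hk, hne⟩
        rw [hDs] at this
        simp at this
        omega
    · rintro ⟨a, b, hab, hb, hsw⟩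
      have ha : a < l1.length := lt_trans hab hb
      have hne := switch_chars_ne l1 l2 a b ha hb hsw i hi
      obtain ⟨hma, hmb⟩ := switch_mismatch l1 l2 a b (Nat.ne_of_lt hab) ha hb hsw hne
      have hia := diff_sub_switch l1 l2 a b ha hb hsw i hi
      have hja := diff_sub_switch l1 l2 a b ha hb hsw j hj
      rw [hDs] at hma hmb
      simp at hma hmb
      have hai : a = i ∧ b = j := by omega
      obtain ⟨rfl, rfl⟩ := hai
      constructor
      · have hgd := congrArg (fun l => l.getD b ' ') hsw
        simp only at hgd
        rw [pvSwitch_getD l1 a b b ha hb hb, if_pos rfl] at hgd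
        exact hgd
      · have hgd := congrArg (fun l => l.getD a ' ') hsw
        simp only at hgd
        rw [pvSwitch_getD l1 a b a ha hb ha, if_neg (Nat.ne_of_lt hab), if_pos rfl] at hgd
        exact hgd
  -- case of three or more mismatches: no single swap realizes them
  · simp only [Bool.false_eq_true, false_iff]
    rintro ⟨a, b, hab, hb, hsw⟩
    have ha : a < l1.length := lt_trans hab hb
    have hi : i ∈ pvDiffs l1 l2 := by rw [hDs]; simp
    have hj : j ∈ pvDiffs l1 l2 := by rw [hDs]; simp
    have hr : r ∈ pvDiffs l1 l2 := by rw [hDs]; simp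
    have pw := pairwise_pvDiffs l1 l2
    rw [hDs] at pw
    rw [List.pairwise_cons] at pw
    have hij : i < j := pw.1 j (by simp)
    have hjr : j < r := by
      have pw2 := pw.2
      rw [List.pairwise_cons] at pw2
      exact pw2.1 r (by simp)
    have h1 := diff_sub_switch l1 l2 a b ha hb hsw i hi
    have h2 := diff_sub_switch l1 l2 a b ha hb hsw j hj
    have h3 := diff_sub_switch l1 l2 a b ha hb hsw r hr
    omega

-- ===== VERDICT (by name: the statement is the Claim_ definition above) =====
theorem is_meta_pair_spec : Claim_equal_is_meta_pair := by
  intro str1 str2 _ hpre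
  unfold Pre_is_meta_pair at hpre
  unfold Spec_is_meta_pair is_meta_pair is_meta_pair_alt
  simp only
  rw [if_neg (by omega)]
  rw [Bool.eq_iff_iff, A_true_iff, B_true_iff _ _ hpre]
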